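-- pv_equiv track=rewrite | github.com/kyrias/vic | vic2/primitives.py | sequentialize
-- ===== SOURCE A (Python) =====
-- from itertools import count, cycle
--
-- def sequentialize(inputs):
--     """The sequentialization process turns a list of N letters or digits into
--     an N numbered sequence of the input characters labeled in alphanumerical
--     order.
--
--     Example:
--         AABCD
--      -> 01234
--
--         DCBAA
--      -> 43201
--
--         TENLETTERS
--      -> 7043189256
--
--     """
--
--     # First get sorted list of unique characters in the input
--     unique_chars = sorted(set(inputs))
--
--     # Generate the result list that we can fill in with values as we go
--     result = [None] * len(inputs)
--
--     counter = count()
--     for unique_char in unique_chars: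
--         current_chars = filter(lambda x: x[1] == unique_char, enumerate(inputs))
--         for index, _ in current_chars:
--             # Assign the next available number to the current index
--             result[index] = next(counter)
--
--     return result
-- ===== SOURCE B (Python) =====
-- def sequentialize(inputs):
--     """Sort the index positions once by (character, index); the rank of each
--     position in that order is its label."""
--     order = sorted(range(len(inputs)), key=lambda i: (inputs[i], i))
--     result = [None] * len(inputs)
--     for rank, index in enumerate(order):
--         result[index] = rank
--     return result
-- ===== Notes on version B (the rewrite author's own statement) =====
-- stated objective: alternative
-- what changed: Instead of scanning the whole enumerate(inputs) once per unique character, B sorts the index list once by the key (character, index) and assigns each index its rank in that order.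
import Mathlib
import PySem

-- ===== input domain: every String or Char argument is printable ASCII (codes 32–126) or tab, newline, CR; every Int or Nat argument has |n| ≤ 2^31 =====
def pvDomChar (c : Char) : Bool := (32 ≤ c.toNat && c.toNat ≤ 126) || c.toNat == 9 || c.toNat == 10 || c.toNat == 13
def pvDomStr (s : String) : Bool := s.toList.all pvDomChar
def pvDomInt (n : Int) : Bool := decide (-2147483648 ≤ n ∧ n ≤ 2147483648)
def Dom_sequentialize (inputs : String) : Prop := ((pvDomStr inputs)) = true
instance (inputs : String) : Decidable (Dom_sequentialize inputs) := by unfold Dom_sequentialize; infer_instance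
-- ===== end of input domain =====

-- B replaces A's per-unique-character scan over all positions by ONE sort of the
-- index list under the key (character, index); the rank in that order is the label.

-- ===== PORT A =====
-- result = [None] * len(inputs): the None placeholders are modelled by 0; every cell
-- is assigned before the return (each index is reached when its own character comes
-- up in unique_chars), so the placeholder value never appears in the returned list.
def sequentialize (inputs : String) : List Int :=
  let cs := inputs.toList
  let uniqueChars := PySem.List.sorted (PySem.Set.ofList cs) (fun c => c) false
  let result : List Int := List.replicate cs.length 0
  (uniqueChars.foldl
    (fun (st : List Int × Int) uc =>
      ((PySem.List.enumerate cs 0).filter (fun p => p.2 == uc)).foldl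
        (fun (st2 : List Int × Int) p =>
          (PySem.List.pySetD st2.1 p.1 st2.2, st2.2 + 1)) st)
    (result, 0)).1

-- ===== PORT B =====
def sequentialize_alt (inputs : String) : List Int :=
  let cs := inputs.toList
  let order := PySem.List.sorted2 (PySem.List.pyRange 0 cs.length 1)
      (fun i => PySem.List.pyGetD cs i ' ') (fun i => i) false
  (PySem.List.enumerate order 0).foldl
    (fun (result : List Int) p => PySem.List.pySetD result p.2 p.1)
    (List.replicate cs.length 0)

-- ===== PRECONDITION & SPEC =====
def Spec_sequentialize (inputs : String) (out : List Int) : Prop := out = sequentialize_alt inputs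
instance (inputs : String) (out : List Int) : Decidable (Spec_sequentialize inputs out) := by unfold Spec_sequentialize; infer_instance

-- ===== CLAIM (what is proved, stated in full; the proofs are below) =====
def Claim_equal_sequentialize : Prop := ∀ (inputs : String), Dom_sequentialize inputs → Spec_sequentialize inputs (sequentialize inputs)

-- ===== LEMMAS AND PROOFS =====

-- A's per-character index groups, flattened in unique-character order.
def pvGroups (cs : List Char) : List Int :=
  (PySem.List.sorted (PySem.Set.ofList cs) (fun c => c) false).flatMap
    (fun uc => ((PySem.List.enumerate cs 0).filter (fun p => p.2 == uc)).map (·.1))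

-- Assigning a running counter along L is filling ranks from enumerate L.
theorem pv_fill_eq (L : List Int) (r : List Int) (k : Int) :
    L.foldl (fun (st : List Int × Int) i => (PySem.List.pySetD st.1 i st.2, st.2 + 1)) (r, k)
      = ((PySem.List.enumerate L k).foldl
          (fun res p => PySem.List.pySetD res p.2 p.1) r, k + L.length) := by
  induction L generalizing r k with
  | nil => simp [PySem.List.enumerate_nil]
  | cons x t ih =>
      simp only [List.foldl_cons, PySem.List.enumerate_cons, ih]
      refine Prod.ext rfl ?_
      simp only [List.length_cons]
      push_cast; ring

-- insertBy with the lexicographic 'before' of sorted2 preserves lexicographic sortedness.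
theorem pv_insertBy_pairwise_lex {α κ₁ κ₂ : Type} [LinearOrder κ₁] [LinearOrder κ₂]
    (k1 : α → κ₁) (k2 : α → κ₂) (x : α) (ys : List α)
    (h : ys.Pairwise (fun a b => k1 a < k1 b ∨ (k1 a = k1 b ∧ k2 a ≤ k2 b))) :
    (PySem.List.insertBy
        (fun a b => decide (k1 a < k1 b) || !decide (k1 b < k1 a) && decide (k2 a < k2 b)) x ys).Pairwise
      (fun a b => k1 a < k1 b ∨ (k1 a = k1 b ∧ k2 a ≤ k2 b)) := by
  induction ys with
  | nil => simp [PySem.List.insertBy]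
  | cons y t ih =>
      rw [List.pairwise_cons] at h
      obtain ⟨hy, ht⟩ := h
      by_cases hb : (decide (k1 x < k1 y) || !decide (k1 y < k1 x) && decide (k2 x < k2 y)) = true
      · rw [show PySem.List.insertBy
              (fun a b => decide (k1 a < k1 b) || !decide (k1 b < k1 a) && decide (k2 a < k2 b)) x (y :: t)
            = x :: y :: t from by simp [PySem.List.insertBy, hb]]
        have hxy : k1 x < k1 y ∨ (k1 x = k1 y ∧ k2 x ≤ k2 y) := by
          simp only [Bool.or_eq_true, Bool.and_eq_true, Bool.not_eq_true', decide_eq_true_eq,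
            decide_eq_false_iff_not] at hb
          rcases hb with h1 | ⟨h1, h2⟩
          · exact Or.inl h1
          · rcases lt_or_eq_of_le (not_lt.mp h1) with h3 | h3
            · exact Or.inl h3
            · exact Or.inr ⟨h3, le_of_lt h2⟩
        refine List.pairwise_cons.mpr ⟨?_, List.pairwise_cons.mpr ⟨hy, ht⟩⟩
        intro z hz
        rcases List.mem_cons.mp hz with hz | hz
        · subst hz; exact hxy
        · have hyz := hy z hz
          rcases hxy with h1 | ⟨h1, h2⟩
          · rcases hyz with h3 | ⟨h3, _⟩
            · exact Or.inl (lt_trans h1 h3)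
            · exact Or.inl (h3 ▸ h1)
          · rcases hyz with h3 | ⟨h3, h4⟩
            · exact Or.inl (h1 ▸ h3)
            · exact Or.inr ⟨h1.trans h3, le_trans h2 h4⟩
      · rw [show PySem.List.insertBy
              (fun a b => decide (k1 a < k1 b) || !decide (k1 b < k1 a) && decide (k2 a < k2 b)) x (y :: t)
            = y :: PySem.List.insertBy
              (fun a b => decide (k1 a < k1 b) || !decide (k1 b < k1 a) && decide (k2 a < k2 b)) x t
            from by simp [PySem.List.insertBy, hb]]
        have hyx : k1 y < k1 x ∨ (k1 y = k1 x ∧ k2 y ≤ k2 x) := by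
          simp only [Bool.or_eq_true, Bool.and_eq_true, Bool.not_eq_true', decide_eq_true_eq,
            decide_eq_false_iff_not, not_or, not_and] at hb
          obtain ⟨h1, h2⟩ := hb
          rcases lt_or_eq_of_le (not_lt.mp h1) with h3 | h3
          · exact Or.inl h3
          · exact Or.inr ⟨h3, not_lt.mp (h2 (by simp [h3]))⟩
        refine List.pairwise_cons.mpr ⟨?_, ih ht⟩
        intro z hz
        rcases (PySem.List.insertBy_mem_iff _ _ _ _).mp hz with hz | hz
        · subst hz; exact hyx
        · exact hy z hz

-- Folding insertBy (sorted2's loop) from a lex-sorted accumulator stays lex-sorted.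
theorem pv_foldl_insertBy_pairwise_lex {α κ₁ κ₂ : Type} [LinearOrder κ₁] [LinearOrder κ₂]
    (k1 : α → κ₁) (k2 : α → κ₂) (xs acc : List α)
    (h : acc.Pairwise (fun a b => k1 a < k1 b ∨ (k1 a = k1 b ∧ k2 a ≤ k2 b))) :
    (xs.foldl (fun acc x => PySem.List.insertBy
        (fun a b => decide (k1 a < k1 b) || !decide (k1 b < k1 a) && decide (k2 a < k2 b)) x acc) acc).Pairwise
      (fun a b => k1 a < k1 b ∨ (k1 a = k1 b ∧ k2 a ≤ k2 b)) := by
  induction xs generalizing acc with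
  | nil => exact h
  | cons x t ih => exact ih _ (pv_insertBy_pairwise_lex k1 k2 x acc h)

-- Any rearrangement of xs strictly increasing in the tuple key IS sorted2 xs (k2 injective).
theorem pv_sorted2_eq_of_perm_of_pairwise_lexlt {α κ₁ κ₂ : Type} [LinearOrder κ₁] [LinearOrder κ₂]
    (xs ys : List α) (k1 : α → κ₁) (k2 : α → κ₂) (hinj : Function.Injective k2)
    (hperm : ys.Perm xs)
    (hp : ys.Pairwise (fun a b => k1 a < k1 b ∨ (k1 a = k1 b ∧ k2 a < k2 b))) :
    PySem.List.sorted2 xs k1 k2 false = ys := by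
  have hzp : (PySem.List.sorted2 xs k1 k2 false).Pairwise
      (fun a b => k1 a < k1 b ∨ (k1 a = k1 b ∧ k2 a ≤ k2 b)) := by
    have := pv_foldl_insertBy_pairwise_lex k1 k2 xs [] List.Pairwise.nil
    simpa [PySem.List.sorted2] using this
  have hyp : ys.Pairwise (fun a b => k1 a < k1 b ∨ (k1 a = k1 b ∧ k2 a ≤ k2 b)) :=
    hp.imp (fun h => by
      rcases h with h | ⟨h1, h2⟩
      · exact Or.inl h
      · exact Or.inr ⟨h1, le_of_lt h2⟩)
  refine List.Perm.eq_of_pairwise ?_ hzp hyp ((PySem.List.sorted2_perm xs k1 k2 false).trans hperm.symm)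
  intro a b _ _ hab hba
  rcases hab with h1 | ⟨h1, h2⟩
  · rcases hba with h3 | ⟨h3, _⟩
    · exact absurd (lt_trans h1 h3) (lt_irrefl _)
    · exact absurd h1 (h3 ▸ lt_irrefl _)
  · rcases hba with h3 | ⟨_, h4⟩
    · exact absurd h3 (h1 ▸ lt_irrefl _)
    · exact hinj (le_antisymm h2 h4)

-- A pair surviving the filter is (index, character) with that group's character.
theorem pv_char_of_mem {cs : List Char} {uc : Char} {p : Int × Char}
    (hp : p ∈ (PySem.List.enumerate cs 0).filter (fun q => q.2 == uc)) :
    0 ≤ p.1 ∧ p.1 < cs.length ∧ PySem.List.pyGetD cs p.1 ' ' = uc := by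
  obtain ⟨hpe, hpc⟩ := List.mem_filter.mp hp
  obtain ⟨k, hk, hpk⟩ := (PySem.List.mem_enumerate_iff _ _ _).mp hpe
  simp only [beq_iff_eq] at hpc
  subst hpk
  simp only [zero_add] at hpc ⊢
  refine ⟨by omega, by exact_mod_cast hk, ?_⟩
  rw [PySem.List.pyGetD_natCast, List.getD_eq_getElem _ _ hk]
  exact hpc

-- Members of a group carry that group's character and a legal index.
theorem pv_mem_group {cs : List Char} {uc : Char} {i : Int}
    (h : i ∈ ((PySem.List.enumerate cs 0).filter (fun p => p.2 == uc)).map (·.1)) :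
    0 ≤ i ∧ i < cs.length ∧ PySem.List.pyGetD cs i ' ' = uc := by
  obtain ⟨p, hp, hpi⟩ := List.mem_map.mp h
  exact hpi ▸ pv_char_of_mem hp

-- The flattened groups are strictly increasing in the key (character, index).
theorem pv_groups_pairwise (cs : List Char) :
    (pvGroups cs).Pairwise (fun a b : Int =>
      PySem.List.pyGetD cs a ' ' < PySem.List.pyGetD cs b ' '
        ∨ (PySem.List.pyGetD cs a ' ' = PySem.List.pyGetD cs b ' ' ∧ a < b)) := by
  unfold pvGroups
  rw [List.pairwise_flatMap]
  constructor
  · intro uc _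
    rw [List.pairwise_map]
    refine List.Pairwise.imp_of_mem ?_
      (((PySem.List.pairwise_lt_enumerate cs 0)).filter (fun q => q.2 == uc))
    intro p q hp hq hlt
    exact Or.inr ⟨(pv_char_of_mem hp).2.2.trans (pv_char_of_mem hq).2.2.symm, hlt⟩
  · refine (PySem.List.sorted_ofList_pairwise_lt (xs := cs)).imp ?_
    intro uc1 uc2 h12 x hx y hy
    exact Or.inl (((pv_mem_group hx).2.2).symm ▸ ((pv_mem_group hy).2.2).symm ▸ h12)

-- The flattened groups are exactly range(len cs) sorted by (character, index).
theorem pv_groups_eq_sorted2 (cs : List Char) :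
    PySem.List.sorted2 (PySem.List.pyRange 0 cs.length 1)
        (fun i => PySem.List.pyGetD cs i ' ') (fun i => i) false = pvGroups cs := by
  apply pv_sorted2_eq_of_perm_of_pairwise_lexlt _ _ _ _ (fun a b h => h)
  · -- permutation: both sides are nodup with the same members
    have hnd : (pvGroups cs).Nodup := by
      refine (pv_groups_pairwise cs).imp ?_
      intro a b h
      rcases h with h | ⟨_, h⟩
      · exact fun he => absurd (he ▸ h) (lt_irrefl _)
      · exact ne_of_lt h
    rw [List.perm_ext_iff_of_nodup hnd (PySem.List.nodup_pyRange_one 0 cs.length)]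
    intro i
    constructor
    · intro hi
      obtain ⟨uc, _, hg⟩ := List.mem_flatMap.mp hi
      obtain ⟨h0, hn, _⟩ := pv_mem_group hg
      exact PySem.List.mem_pyRange_one.mpr ⟨h0, hn⟩
    · intro hi
      obtain ⟨h0, hn⟩ := PySem.List.mem_pyRange_one.mp hi
      obtain ⟨k, rfl⟩ : ∃ k : Nat, i = (k : Int) := ⟨i.toNat, (Int.toNat_of_nonneg h0).symm⟩
      have hk : k < cs.length := by exact_mod_cast hn
      refine List.mem_flatMap.mpr ⟨cs[k], ?_, ?_⟩
      · rw [PySem.List.mem_sorted, PySem.Set.mem_ofList]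
        exact List.getElem_mem hk
      · refine List.mem_map.mpr ⟨((k : Int), cs[k]), List.mem_filter.mpr ⟨?_, by simp⟩, rfl⟩
        exact (PySem.List.mem_enumerate_iff _ _ _).mpr ⟨k, hk, by simp⟩
  · exact pv_groups_pairwise cs

-- A equals the rank-filling fold over its flattened groups.
theorem pv_A_eq_fill (inputs : String) :
    sequentialize inputs
      = (PySem.List.enumerate (pvGroups inputs.toList) 0).foldl
          (fun res p => PySem.List.pySetD res p.2 p.1)
          (List.replicate inputs.toList.length 0) := by
  have h1 : sequentialize inputs
      = ((pvGroups inputs.toList).foldl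
          (fun (st : List Int × Int) i => (PySem.List.pySetD st.1 i st.2, st.2 + 1))
          (List.replicate inputs.toList.length 0, 0)).1 := by
    unfold sequentialize pvGroups
    rw [List.foldl_flatMap]
    simp only [List.foldl_map]
  rw [h1, pv_fill_eq]

-- ===== VERDICT (by name: the statement is the Claim_ definition above) =====
theorem sequentialize_spec : Claim_equal_sequentialize := by
  intro inputs _
  show sequentialize inputs = sequentialize_alt inputs
  have hB : sequentialize_alt inputs
      = (PySem.List.enumerate (PySem.List.sorted2 (PySem.List.pyRange 0 inputs.toList.length 1)
            (fun i => PySem.List.pyGetD inputs.toList i ' ') (fun i => i) false) 0).foldl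
          (fun res p => PySem.List.pySetD res p.2 p.1)
          (List.replicate inputs.toList.length 0) := rfl
  rw [pv_A_eq_fill, hB, pv_groups_eq_sorted2]
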